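-- pv_equiv track=rewrite | github.com/lmiksch/CoFPT | nussinov.py | remove_non_modules
-- ===== SOURCE A (Python) =====
-- def convert(string):
-- 	counts = string.count("*")
-- 	c_string = list(string)
--
-- 	for x in range(1,len(c_string)):
-- 		if string[x] == "*":
-- 			c_string[x-1] = c_string[x-1].upper()
-- 	for x in range(counts):
-- 		c_string.remove("*")
--
-- 	c_string = "".join(c_string)
-- 	return c_string
--
-- def remove_non_modules(structures,seq):
-- 	complete_module_path = []
-- 	module_indices = []
-- 	seq = convert(seq)
--
-- 	for x in range(len(seq)):
-- 		if seq[x] == "l":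
-- 			module_indices.append(x)
--
-- 	for x in module_indices:
-- 		complete_module_path.append(structures[x])
--
-- 	complete_module_path.append(structures[-1])
-- 	return complete_module_path
-- ===== SOURCE B (Python) =====
-- def remove_non_modules(structures, seq):
--     complete_module_path = []
--     j = 0
--     n = len(seq)
--     for i in range(n):
--         c = seq[i]
--         if c == '*':
--             continue
--         if i + 1 < n and seq[i + 1] == '*':
--             c = c.upper()
--         if c == 'l':
--             complete_module_path.append(structures[j])
--         j += 1
--     complete_module_path.append(structures[-1])
--     return complete_module_path
-- ===== Notes on version B (the rewrite author's own statement) =====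
-- stated objective: alternative
-- what changed: B replaces A's separate passes (convert with repeated list.remove('*'), index collection over the converted string, then indexed lookups) by one pass over the original string with a one-character lookahead and a running module counter.
import Mathlib
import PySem

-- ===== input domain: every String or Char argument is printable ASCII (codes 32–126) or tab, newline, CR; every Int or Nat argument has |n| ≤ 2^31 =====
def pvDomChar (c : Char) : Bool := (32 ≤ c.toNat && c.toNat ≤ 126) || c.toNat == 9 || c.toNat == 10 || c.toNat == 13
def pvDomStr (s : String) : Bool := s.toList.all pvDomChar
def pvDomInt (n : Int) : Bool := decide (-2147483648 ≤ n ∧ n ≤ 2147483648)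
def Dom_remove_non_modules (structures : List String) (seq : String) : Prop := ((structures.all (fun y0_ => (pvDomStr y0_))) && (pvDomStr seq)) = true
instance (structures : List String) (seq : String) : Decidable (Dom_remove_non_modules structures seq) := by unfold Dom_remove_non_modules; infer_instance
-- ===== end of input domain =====

-- B makes one pass over the original string with a one-character lookahead and a running module counter, instead of A's separate convert pass (repeated list.remove) and index-collection passes; equivalence of the return values is proved on Pre_ (exactly where the Python A returns).

-- ===== PORT A =====
-- convert(string): returned as its character list (Python joins to a string that
-- remove_non_modules only indexes character-wise, so the list is the exact value).
def convertA (string : String) : List Char :=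
  let s := string.toList
  let counts := PySem.Chars.count s ['*']                 -- string.count("*")
  let c1 := (PySem.List.pyRange 1 (s.length : Int) 1).foldl
    (fun cs x =>
      if PySem.List.pyGetD s x ' ' = '*' then
        PySem.List.pySetD cs (x - 1) (PySem.Chars.upperChar (PySem.List.pyGetD cs (x - 1) ' '))
      else cs) s
  (PySem.List.pyRange 0 (counts : Int) 1).foldl
    (fun cs _ => (PySem.List.remove? cs '*').getD cs) c1  -- c_string.remove("*"), always succeeds

def remove_non_modules (structures : List String) (seq : String) : List String :=
  let s := convertA seq
  let module_indices := (PySem.List.pyRange 0 (s.length : Int) 1).foldl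
    (fun acc x => if PySem.List.pyGetD s x ' ' = 'l' then acc ++ [x] else acc) []
  let complete_module_path := module_indices.foldl
    (fun acc x => acc ++ [PySem.List.pyGetD structures x ""]) []
  complete_module_path ++ [PySem.List.pyGetD structures (-1) ""]

-- ===== PORT B =====
def altGo (structures : List String) (j : Int) : List Char → List String
  | [] => []
  | c :: rest =>
    if c = '*' then altGo structures j rest
    else
      let k := if rest.head? = some '*' then PySem.Chars.upperChar c else c
      if k = 'l' then PySem.List.pyGetD structures j "" :: altGo structures (j + 1) rest
      else altGo structures (j + 1) rest

def remove_non_modules_alt (structures : List String) (seq : String) : List String :=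
  altGo structures 0 seq.toList ++ [PySem.List.pyGetD structures (-1) ""]

-- ===== PRECONDITION & SPEC =====
-- the converted sequence (stars dropped, a char before a star uppercased), used only to state Pre_
def convChars : List Char → List Char
  | [] => []
  | c :: rest =>
    if c = '*' then convChars rest
    else (if rest.head? = some '*' then PySem.Chars.upperChar c else c) :: convChars rest

-- Pre_: exactly where the Python A returns — structures nonempty (structures[-1]) and every
-- 'l' position of the converted sequence is a valid index into structures (structures[x]).
def Pre_remove_non_modules (structures : List String) (seq : String) : Prop :=
  structures ≠ [] ∧ 'l' ∉ (convChars seq.toList).drop structures.length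
instance (structures : List String) (seq : String) : Decidable (Pre_remove_non_modules structures seq) := by
  unfold Pre_remove_non_modules; infer_instance

def pvWitness_remove_non_modules : List String × String := (["(.)", "..."], "l(*.)")

def Spec_remove_non_modules (structures : List String) (seq : String) (out : List String) : Prop := out = remove_non_modules_alt structures seq
instance (structures : List String) (seq : String) (out : List String) : Decidable (Spec_remove_non_modules structures seq out) := by unfold Spec_remove_non_modules; infer_instance

-- ===== CLAIM (what is proved, stated in full; the proofs are below) =====
def Claim_equal_remove_non_modules : Prop := ∀ (structures : List String) (seq : String), Dom_remove_non_modules structures seq → Pre_remove_non_modules structures seq → Spec_remove_non_modules structures seq (remove_non_modules structures seq)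

-- ===== LEMMAS AND PROOFS =====

-- the upper-pass of convert: each char followed (in the original string) by '*' is uppercased
def ups : List Char → List Char
  | [] => []
  | c :: rest => (if rest.head? = some '*' then PySem.Chars.upperChar c else c) :: ups rest

-- the selection loop shared by both sides, on the converted sequence
def sel (structures : List String) (j : Int) : List Char → List String
  | [] => []
  | c :: rest =>
    if c = 'l' then PySem.List.pyGetD structures j "" :: sel structures (j + 1) rest
    else sel structures (j + 1) rest

theorem upperChar_star : PySem.Chars.upperChar '*' = '*' := by decide

theorem upperChar_ne_star (c : Char) (h : c ≠ '*') : PySem.Chars.upperChar c ≠ '*' := by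
  intro he
  rw [PySem.Chars.upperChar] at he
  split_ifs at he with hl
  · have hb : 'a' ≤ c ∧ c ≤ 'z' := by simpa [PySem.Chars.islower] using hl
    have h1 : 97 ≤ c.toNat := by
      have := hb.1; rw [Char.le_def] at this
      exact UInt32.le_iff_toNat_le.mp this
    have h2 : c.toNat ≤ 122 := by
      have := hb.2; rw [Char.le_def] at this
      exact UInt32.le_iff_toNat_le.mp this
    have hv : (c.toNat - 32).isValidChar := Or.inl (by omega)
    have := congrArg Char.toNat he
    rw [Char.toNat_ofNat, if_pos hv] at this
    have h42 : ('*').toNat = 42 := by decide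
    omega
  · exact h he

theorem ups_length (l : List Char) : (ups l).length = l.length := by
  induction l with
  | nil => rfl
  | cons c rest ih => simp [ups, ih]

theorem ups_getElem (l : List Char) (i : Nat) (h : i < l.length) :
    (ups l)[i]'(by simp [ups_length, h]) =
      if l[i+1]? = some '*' then PySem.Chars.upperChar (l[i]'h) else l[i]'h := by
  induction l generalizing i with
  | nil => simp at h
  | cons c rest ih =>
    cases i with
    | zero => simp [ups, List.head?_eq_getElem?]
    | succ i =>
      have h' : i < rest.length := by simpa using h
      simpa [ups] using ih i h'

theorem count_go_star (s : List Char) : ∀ (fuel acc : Nat), s.length ≤ fuel →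
    PySem.Chars.count.go ['*'] fuel s acc = acc + s.count '*' := by
  induction s with
  | nil => intro fuel acc _; cases fuel <;> simp [PySem.Chars.count.go]
  | cons c t ih =>
    intro fuel acc hf
    cases fuel with
    | zero => simp at hf
    | succ f =>
      have hft : t.length ≤ f := by simpa using hf
      by_cases hc : c = '*'
      · subst hc
        have hpre : (['*'] : List Char).isPrefixOf ('*' :: t) = true := by
          simp [List.isPrefixOf]
        simp only [PySem.Chars.count.go, hpre, if_true, List.length_cons, List.drop_succ_cons]
        simp only [List.length_nil, List.drop_zero]
        rw [ih f (acc + 1) hft]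
        simp
        omega
      · have hpre : (['*'] : List Char).isPrefixOf (c :: t) = false := by
          simp [List.isPrefixOf]
          exact fun hh => absurd hh.symm hc
        simp only [PySem.Chars.count.go, hpre, Bool.false_eq_true, if_false]
        rw [ih f acc hft]
        simp [hc]

theorem foldl_range_ignore (f : List Char → List Char) :
    ∀ (k : Nat) (init : List Char),
    (PySem.List.pyRange 0 (k : Int) 1).foldl (fun cs _ => f cs) init = f^[k] init := by
  intro k
  induction k with
  | zero => intro init; simp [PySem.List.pyRange_one_eq_nil (le_refl (0 : Int))]
  | succ k ih =>
    intro init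
    have hcast : ((k + 1 : Nat) : Int) = (k : Int) + 1 := by push_cast; ring
    rw [hcast, PySem.List.pyRange_one_succ_right (by positivity), List.foldl_append, ih,
      Function.iterate_succ_apply']
    simp

theorem filter_erase_star (l : List Char) :
    (l.erase '*').filter (· ≠ '*') = l.filter (· ≠ '*') := by
  induction l with
  | nil => rfl
  | cons c t ih =>
    by_cases hc : c = '*'
    · subst hc; simp
    · have : (c == '*') = false := by simp [hc]
      simp [this, hc]
      simpa using ih

theorem removeStar_iter : ∀ (k : Nat) (l : List Char), l.count '*' = k →
    (fun cs => (PySem.List.remove? cs '*').getD cs)^[k] l = l.filter (· ≠ '*') := by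
  intro k
  induction k with
  | zero =>
    intro l hl
    have hnot : '*' ∉ l := by
      intro hm; have := List.count_pos_iff.mpr hm; omega
    rw [Function.iterate_zero_apply]
    exact (List.filter_eq_self.mpr (fun a ha => by
      simp only [decide_eq_true_eq, ne_eq]
      intro he; subst he; exact hnot ha)).symm
  | succ k ih =>
    intro l hl
    have hm : '*' ∈ l := List.count_pos_iff.mp (by omega)
    rw [Function.iterate_succ_apply]
    simp only [PySem.List.remove?_eq_some_erase l '*' hm, Option.getD_some]
    have hcount : (l.erase '*').count '*' = k := by
      rw [List.count_erase_self]; omega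
    rw [ih _ hcount, filter_erase_star]

theorem ups_count_star (l : List Char) : (ups l).count '*' = l.count '*' := by
  induction l with
  | nil => rfl
  | cons c rest ih =>
    by_cases hc : c = '*'
    · subst hc
      have : (if rest.head? = some '*' then PySem.Chars.upperChar '*' else '*') = '*' := by
        split <;> simp [upperChar_star]
      simp [ups, this, ih]
    · have h1 : (if rest.head? = some '*' then PySem.Chars.upperChar c else c) ≠ '*' := by
        split
        · exact upperChar_ne_star c hc
        · exact hc
      simp [ups, h1, hc, ih]

theorem filter_ups (l : List Char) : (ups l).filter (· ≠ '*') = convChars l := by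
  induction l with
  | nil => rfl
  | cons c rest ih =>
    by_cases hc : c = '*'
    · subst hc
      have : (if rest.head? = some '*' then PySem.Chars.upperChar '*' else '*') = '*' := by
        split <;> simp [upperChar_star]
      simp [ups, convChars, this]
      simpa using ih
    · have h1 : (if rest.head? = some '*' then PySem.Chars.upperChar c else c) ≠ '*' := by
        split
        · exact upperChar_ne_star c hc
        · exact hc
      simp [ups, convChars, h1, hc]
      simpa using ih

theorem ups_take_drop_getElem (s : List Char) (m i : Nat) (hm : m ≤ s.length)
    (hi : i < s.length) :
    (ups (s.take m) ++ s.drop m)[i]'(by simp [ups_length]; omega) =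
      if i + 1 < m ∧ s[i+1]? = some '*' then PySem.Chars.upperChar (s[i]'hi) else s[i]'hi := by
  by_cases hi' : i < m
  · have hlt : i < (ups (s.take m)).length := by simp [ups_length]; omega
    rw [List.getElem_append_left hlt]
    rw [ups_getElem (s.take m) i (by simp; omega)]
    have ht : (s.take m)[i]'(by simp; omega) = s[i]'hi := List.getElem_take
    rw [List.getElem?_take, ht]
    by_cases h2 : i + 1 < m
    · simp [h2]
    · simp [h2]
  · have hge : (ups (s.take m)).length ≤ i := by simp [ups_length]; omega
    rw [List.getElem_append_right hge]
    have hcond : ¬ (i + 1 < m ∧ s[i+1]? = some '*') := fun hh => hi' (by omega)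
    rw [if_neg hcond]
    rw [List.getElem_drop]
    have hidx : m + (i - (ups (List.take m s)).length) = i := by
      simp [ups_length, List.length_take]; omega
    simp only [hidx]

theorem upper_pass (s : List Char) :
    (PySem.List.pyRange 1 (s.length : Int) 1).foldl
      (fun cs x =>
        if PySem.List.pyGetD s x ' ' = '*' then
          PySem.List.pySetD cs (x - 1) (PySem.Chars.upperChar (PySem.List.pyGetD cs (x - 1) ' '))
        else cs) s = ups s := by
  suffices H : ∀ m : Nat, m ≤ s.length →
      (PySem.List.pyRange 1 (m : Int) 1).foldl
        (fun cs x =>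
          if PySem.List.pyGetD s x ' ' = '*' then
            PySem.List.pySetD cs (x - 1) (PySem.Chars.upperChar (PySem.List.pyGetD cs (x - 1) ' '))
          else cs) s = ups (s.take m) ++ s.drop m by
    have := H s.length le_rfl
    simpa using this
  intro m hm
  induction m with
  | zero => simp [PySem.List.pyRange_one_eq_nil (by omega : (0:Int) ≤ 1), ups]
  | succ m ih =>
    rcases Nat.eq_zero_or_pos m with hm0 | hm1
    · subst hm0
      rw [show ((1 : Nat) : Int) = 1 by norm_num, PySem.List.pyRange_one_eq_nil (le_refl (1:Int))]
      cases s with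
      | nil => simp [ups]
      | cons c t => simp [ups]
    · have hmlt : m < s.length := by omega
      have hcast : ((m + 1 : Nat) : Int) = (m : Int) + 1 := by push_cast; ring
      rw [hcast, PySem.List.pyRange_one_succ_right (by exact_mod_cast hm1), List.foldl_append,
        ih (by omega)]
      simp only [List.foldl_cons, List.foldl_nil]
      have hget : PySem.List.pyGetD s (m : Int) ' ' = s[m]'hmlt := by
        rw [PySem.List.pyGetD_natCast, List.getD_eq_getElem?_getD, List.getElem?_eq_getElem hmlt,
          Option.getD_some]
      have hcslen : (ups (s.take m) ++ s.drop m).length = s.length := by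
        simp [ups_length, List.length_take]; omega
      by_cases hstar : s[m]'hmlt = '*'
      · rw [if_pos (by rw [hget]; exact hstar)]
        have hidx : (m : Int) - 1 = ((m - 1 : Nat) : Int) := by omega
        have hm1lt : m - 1 < (ups (s.take m) ++ s.drop m).length := by omega
        have hread : PySem.List.pyGetD (ups (s.take m) ++ s.drop m) ((m : Int) - 1) ' '
            = s[m-1]'(by omega) := by
          rw [hidx, PySem.List.pyGetD_natCast, List.getD_eq_getElem?_getD,
            List.getElem?_eq_getElem hm1lt, Option.getD_some]
          rw [ups_take_drop_getElem s m (m-1) (by omega) (by omega)]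
          rw [if_neg (fun hh => by omega)]
        rw [hread, hidx, PySem.List.pySetD_natCast]
        apply List.ext_getElem
        · simp [hcslen, ups_length]; omega
        · intro i h1 h2
          have his : i < s.length := by simpa [hcslen] using h1
          rw [List.getElem_set]
          by_cases hie : m - 1 = i
          · subst hie
            rw [if_pos rfl]
            rw [ups_take_drop_getElem s (m+1) (m-1) (by omega) (by omega)]
            have hc2 : m - 1 + 1 < m + 1 ∧ s[m-1+1]? = some '*' := by
              constructor
              · omega
              · have : m - 1 + 1 = m := by omega
                rw [this, List.getElem?_eq_getElem hmlt, hstar]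
            rw [if_pos hc2]
          · rw [if_neg hie]
            rw [ups_take_drop_getElem s m i (by omega) his]
            rw [ups_take_drop_getElem s (m+1) i (by omega) his]
            by_cases hca : i + 1 < m ∧ s[i+1]? = some '*'
            · rw [if_pos hca, if_pos ⟨by omega, hca.2⟩]
            · have hcb : ¬ (i + 1 < m + 1 ∧ s[i+1]? = some '*') := by
                intro hh
                apply hca
                refine ⟨?_, hh.2⟩
                have : i + 1 ≠ m := by
                  intro he
                  apply hie
                  omega
                omega
              rw [if_neg hca, if_neg hcb]
      · rw [if_neg (by rw [hget]; exact hstar)]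
        apply List.ext_getElem
        · simp [ups_length]; omega
        · intro i h1 h2
          have his : i < s.length := by simp [ups_length] at h1; omega
          rw [ups_take_drop_getElem s m i (by omega) his]
          rw [ups_take_drop_getElem s (m+1) i (by omega) his]
          by_cases hca : i + 1 < m ∧ s[i+1]? = some '*'
          · rw [if_pos hca, if_pos ⟨by omega, hca.2⟩]
          · have hcb : ¬ (i + 1 < m + 1 ∧ s[i+1]? = some '*') := by
              intro hh
              apply hca
              refine ⟨?_, hh.2⟩
              rcases Nat.lt_or_ge (i+1) m with h | h
              · exact h
              · exfalso
                have hieq : i + 1 = m := by omega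
                apply hstar
                have h2' := hh.2
                rw [hieq, List.getElem?_eq_getElem hmlt] at h2'
                exact Option.some.inj h2'
            rw [if_neg hca, if_neg hcb]

theorem convertA_eq (seq : String) : convertA seq = convChars seq.toList := by
  have hc : PySem.Chars.count seq.toList ['*'] = seq.toList.count '*' := by
    have := count_go_star seq.toList seq.toList.length 0 le_rfl
    simpa [PySem.Chars.count] using this
  simp only [convertA]
  rw [upper_pass, hc, foldl_range_ignore, ← ups_count_star,
    removeStar_iter _ _ rfl, filter_ups]

theorem sel_enum (structures : List String) :
    ∀ (l : List Char) (j : Int),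
    ((PySem.List.enumerate l j).filter (fun q => decide (q.2 = 'l'))).map
      (fun q => PySem.List.pyGetD structures q.1 "") = sel structures j l := by
  intro l
  induction l with
  | nil => intro j; simp [PySem.List.enumerate, sel]
  | cons c rest ih =>
    intro j
    by_cases hc : c = 'l' <;>
      simp [PySem.List.enumerate, sel, hc, ih]

theorem altGo_eq (structures : List String) :
    ∀ (l : List Char) (j : Int), altGo structures j l = sel structures j (convChars l) := by
  intro l
  induction l with
  | nil => intro j; simp [altGo, convChars, sel]
  | cons c rest ih =>
    intro j
    by_cases hs : c = '*'
    · simp [altGo, convChars, hs, ih]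
    · simp only [altGo, convChars, if_neg hs]
      by_cases hk : (if rest.head? = some '*' then PySem.Chars.upperChar c else c) = 'l' <;>
        simp [sel, hk, ih]

-- ===== VERDICT (by name: the statement is the Claim_ definition above) =====
theorem remove_non_modules_spec : Claim_equal_remove_non_modules := by
  intro structures seq _ _
  show remove_non_modules structures seq = remove_non_modules_alt structures seq
  simp only [remove_non_modules, remove_non_modules_alt]
  rw [convertA_eq]
  rw [PySem.List.foldl_append_ite_eq_filter, PySem.List.foldl_append_singleton_eq_map,
    List.nil_append, List.nil_append]
  congr 1
  rw [altGo_eq, ← sel_enum]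
  rw [PySem.List.enumerate_eq_map_pyRange _ ' ', List.filter_map, List.map_map]
  simp only [Function.comp_def, PySem.List.len_eq]
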